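-- pv_equiv track=rewrite | github.com/jiaweizhang458/Algorithm-Problems | Lintcode/1580-Transition-String-M.py | canTransfer
-- ===== SOURCE A (Python) =====
-- def canTransfer(startString, endString):
--     # Write your code here
--     if (len(startString) != len(endString)):
--         return False
--     diff = {}
--     a = set()
--     b = set()
--     for i in range(len(startString)):
--         a.add(startString[i])
--         b.add(endString[i])
--         if (startString[i] not in diff):
--             diff[startString[i]] = endString[i]
--         else:
--             if (endString[i] != diff[startString[i]]):
--                 return False
--     if (a == b):
--         return False
--     return True
-- ===== SOURCE B (Python) =====
-- def canTransfer(startString, endString):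
--     if len(startString) != len(endString):
--         return False
--     for c in set(startString):
--         images = {d for x, d in zip(startString, endString) if x == c}
--         if len(images) > 1:
--             return False
--     return set(startString) != set(endString)
-- ===== Notes on version B (the rewrite author's own statement) =====
-- stated objective: alternative
-- what changed: Instead of one index loop building a char->char dict with an early-return conflict branch, B does a staged grouping: for each distinct start character it scans the zipped pairs to collect that character's image set and rejects if it is not a singleton, then compares the two character sets.
import Mathlib
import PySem

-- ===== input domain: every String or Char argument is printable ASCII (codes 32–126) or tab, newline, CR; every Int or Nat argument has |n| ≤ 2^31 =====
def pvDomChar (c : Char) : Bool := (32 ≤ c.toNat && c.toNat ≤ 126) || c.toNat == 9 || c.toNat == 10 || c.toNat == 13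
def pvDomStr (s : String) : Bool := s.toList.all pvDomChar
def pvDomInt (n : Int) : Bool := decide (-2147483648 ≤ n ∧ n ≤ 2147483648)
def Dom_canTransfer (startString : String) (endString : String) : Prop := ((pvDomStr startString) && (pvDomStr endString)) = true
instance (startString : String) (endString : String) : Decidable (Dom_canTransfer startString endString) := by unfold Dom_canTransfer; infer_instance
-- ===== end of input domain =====

-- B replaces A's single-pass dict-building loop (with its early-return conflict branch) by a staged
-- grouping: for each distinct start character it rescans the zipped pairs to collect that character's
-- image set and rejects unless it is a singleton, then compares the two character sets (alternative).

-- ===== PORT A =====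
-- the for-loop over range(len(startString)), indexing both strings at i, as the structural
-- recursion over both character lists in lockstep (lengths are equal when the loop runs)
def canTransferLoop : List Char → List Char → PySem.Dict Char Char → PySem.Set Char → PySem.Set Char → Bool
  | c :: cs, d :: ds, diff, a, b =>
    let a' := PySem.Set.add a c
    let b' := PySem.Set.add b d
    match diff.get? c with
    | none => canTransferLoop cs ds (diff.insert c d) a' b'
    | some v => if d ≠ v then false else canTransferLoop cs ds diff a' b'
  | _, _, _, a, b => !(PySem.Set.equal a b)

def canTransfer (startString : String) (endString : String) : Bool :=
  if PySem.Str.len startString ≠ PySem.Str.len endString then false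
  else canTransferLoop startString.toList endString.toList PySem.Dict.empty PySem.Set.empty PySem.Set.empty

-- ===== PORT B =====
-- {d for x, d in zip(startString, endString) if x == c}
def altImages (ps : List (Char × Char)) (c : Char) : PySem.Set Char :=
  PySem.Set.ofList ((ps.filter (fun p => p.1 == c)).map Prod.snd)

-- 'for c in set(startString): … if len(images) > 1: return False'
def altLoop : List Char → List (Char × Char) → Bool
  | [], _ => true
  | c :: cs, ps => if 1 < PySem.Set.len (altImages ps c) then false else altLoop cs ps

def canTransfer_alt (startString : String) (endString : String) : Bool :=
  if PySem.Str.len startString ≠ PySem.Str.len endString then false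
  else
    if altLoop (PySem.Set.ofList startString.toList) (startString.toList.zip endString.toList) then
      !(PySem.Set.equal (PySem.Set.ofList startString.toList) (PySem.Set.ofList endString.toList))
    else false

-- ===== PRECONDITION & SPEC =====
def Spec_canTransfer (startString : String) (endString : String) (out : Bool) : Prop := out = canTransfer_alt startString endString
instance (startString : String) (endString : String) (out : Bool) : Decidable (Spec_canTransfer startString endString out) := by unfold Spec_canTransfer; infer_instance

-- ===== CLAIM (what is proved, stated in full; the proofs are below) =====
def Claim_equal_canTransfer : Prop := ∀ (startString : String) (endString : String), Dom_canTransfer startString endString → Spec_canTransfer startString endString (canTransfer startString endString)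

-- ===== LEMMAS AND PROOFS =====

-- pairwise single-valuedness of a pair list, plus compatibility with an accumulated dict
def pvConsistent (L : List (Char × Char)) (diff : PySem.Dict Char Char) : Prop :=
  (∀ p ∈ L, ∀ q ∈ L, p.1 = q.1 → p.2 = q.2) ∧
  (∀ p ∈ L, ∀ v, diff.get? p.1 = some v → p.2 = v)

theorem pvConsistent_none {c d : Char} {L : List (Char × Char)} {diff : PySem.Dict Char Char}
    (h : diff.get? c = none) :
    pvConsistent ((c, d) :: L) diff ↔ pvConsistent L (diff.insert c d) := by
  constructor
  · rintro ⟨hpair, hdict⟩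
    refine ⟨fun p hp q hq => hpair p (List.mem_cons_of_mem _ hp) q (List.mem_cons_of_mem _ hq), ?_⟩
    intro p hp v hv
    by_cases hc : p.1 = c
    · rw [hc, PySem.Dict.get?_insert_self] at hv
      have hd := hpair p (List.mem_cons_of_mem _ hp) (c, d) (List.mem_cons_self) hc
      injection hv with hv; rw [hd, hv]
    · rw [PySem.Dict.get?_insert_of_ne diff d hc] at hv
      exact hdict p (List.mem_cons_of_mem _ hp) v hv
  · rintro ⟨hpair, hdict⟩
    constructor
    · intro p hp q hq hfst
      rcases List.mem_cons.mp hp with hp | hp <;> rcases List.mem_cons.mp hq with hq | hq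
      · rw [hp, hq]
      · subst hp
        have := hdict q hq d (by rw [← hfst]; exact PySem.Dict.get?_insert_self _ _ _)
        exact this.symm
      · subst hq
        exact hdict p hp d (by rw [hfst]; exact PySem.Dict.get?_insert_self _ _ _)
      · exact hpair p hp q hq hfst
    · intro p hp v hv
      rcases List.mem_cons.mp hp with hp | hp
      · subst hp; simp only at hv; rw [h] at hv; cases hv
      · by_cases hc : p.1 = c
        · rw [hc, h] at hv; cases hv
        · exact hdict p hp v (by rw [PySem.Dict.get?_insert_of_ne diff d hc]; exact hv)

theorem pvConsistent_some {c d : Char} {L : List (Char × Char)} {diff : PySem.Dict Char Char}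
    (h : diff.get? c = some d) :
    pvConsistent ((c, d) :: L) diff ↔ pvConsistent L diff := by
  constructor
  · rintro ⟨hpair, hdict⟩
    exact ⟨fun p hp q hq => hpair p (List.mem_cons_of_mem _ hp) q (List.mem_cons_of_mem _ hq),
      fun p hp => hdict p (List.mem_cons_of_mem _ hp)⟩
  · rintro ⟨hpair, hdict⟩
    constructor
    · intro p hp q hq hfst
      rcases List.mem_cons.mp hp with hp | hp <;> rcases List.mem_cons.mp hq with hq | hq
      · rw [hp, hq]
      · subst hp
        have := hdict q hq d (by rw [← hfst]; exact h)
        exact this.symm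
      · subst hq
        exact hdict p hp d (by rw [hfst]; exact h)
      · exact hpair p hp q hq hfst
    · intro p hp v hv
      rcases List.mem_cons.mp hp with hp | hp
      · subst hp; rw [h] at hv; injection hv
      · exact hdict p hp v hv

theorem pvLoop_eq (cs ds : List Char) (diff : PySem.Dict Char Char) (a b : PySem.Set Char)
    (hlen : cs.length = ds.length) :
    canTransferLoop cs ds diff a b = true ↔
      (pvConsistent (cs.zip ds) diff ∧
        PySem.Set.equal (PySem.Set.update a cs) (PySem.Set.update b ds) = false) := by
  induction cs generalizing ds diff a b with
  | nil =>
    have : ds = [] := List.eq_nil_of_length_eq_zero hlen.symm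
    subst this
    simp [canTransferLoop, PySem.Set.update_nil, pvConsistent, Bool.not_eq_true']
  | cons c cs' ih =>
    cases ds with
    | nil => simp at hlen
    | cons d ds' =>
      have hlen' : cs'.length = ds'.length := by simpa using hlen
      rcases hg : diff.get? c with _ | v
      · simp only [canTransferLoop, hg, List.zip_cons_cons, PySem.Set.update_cons]
        rw [ih ds' (diff.insert c d) _ _ hlen']
        exact and_congr_left' (pvConsistent_none hg).symm
      · by_cases hd : d = v
        · subst hd
          simp only [canTransferLoop, hg, ne_eq, not_true_eq_false, if_false,
            List.zip_cons_cons, PySem.Set.update_cons]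
          rw [ih ds' diff _ _ hlen']
          exact and_congr_left' (pvConsistent_some hg).symm
        · have hnc : ¬ pvConsistent ((c, d) :: cs'.zip ds') diff := by
            rintro ⟨-, hdict⟩
            exact hd (hdict (c, d) List.mem_cons_self v hg)
          simp only [canTransferLoop, hg, List.zip_cons_cons]
          rw [if_pos hd]
          simp only [Bool.false_eq_true, false_iff, not_and]
          exact fun hC => absurd hC hnc

-- a deduplicated list of length ≤ 1 has all its source elements equal
theorem pvOfList_len_le_one_iff {α : Type} [BEq α] [LawfulBEq α] (L : List α) :
    (PySem.Set.ofList L).length ≤ 1 ↔ ∀ a ∈ L, ∀ b ∈ L, a = b := by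
  constructor
  · intro h a ha b hb
    have ha' := (PySem.Set.mem_ofList L a).mpr ha
    have hb' := (PySem.Set.mem_ofList L b).mpr hb
    match hS : PySem.Set.ofList L with
    | [] => rw [hS] at ha'; cases ha'
    | [x] =>
      rw [hS] at ha' hb'
      simp at ha' hb'; rw [ha', hb']
    | x :: y :: t => rw [hS] at h; simp at h
  · intro h
    match hS : PySem.Set.ofList L with
    | [] => simp
    | [x] => simp
    | x :: y :: t =>
      exfalso
      have hnd := PySem.Set.nodup_ofList L
      rw [hS] at hnd
      have hx : x ∈ L := (PySem.Set.mem_ofList L x).mp (by rw [hS]; simp)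
      have hy : y ∈ L := (PySem.Set.mem_ofList L y).mp (by rw [hS]; simp)
      have := h x hx y hy
      simp [this] at hnd

theorem pvImages_le_one_iff (ps : List (Char × Char)) (c : Char) :
    PySem.Set.len (altImages ps c) ≤ 1 ↔
      ∀ p ∈ ps, ∀ q ∈ ps, p.1 = c → q.1 = c → p.2 = q.2 := by
  unfold altImages PySem.Set.len
  rw [show ((((PySem.Set.ofList ((ps.filter (fun p => p.1 == c)).map Prod.snd)).length : Int) ≤ 1) ↔
      (PySem.Set.ofList ((ps.filter (fun p => p.1 == c)).map Prod.snd)).length ≤ 1) by exact_mod_cast Iff.rfl]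
  rw [pvOfList_len_le_one_iff]
  constructor
  · intro h p hp q hq hpc hqc
    exact h p.2 (List.mem_map_of_mem (List.mem_filter.mpr ⟨hp, by simp [hpc]⟩))
      q.2 (List.mem_map_of_mem (List.mem_filter.mpr ⟨hq, by simp [hqc]⟩))
  · intro h a ha b hb
    obtain ⟨p, hp, rfl⟩ := List.mem_map.mp ha
    obtain ⟨q, hq, rfl⟩ := List.mem_map.mp hb
    obtain ⟨hp, hpc⟩ := List.mem_filter.mp hp
    obtain ⟨hq, hqc⟩ := List.mem_filter.mp hq
    exact h p hp q hq (by simpa using hpc) (by simpa using hqc)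

theorem pvAltLoop_eq_true_iff (cs : List Char) (ps : List (Char × Char)) :
    altLoop cs ps = true ↔ ∀ c ∈ cs, PySem.Set.len (altImages ps c) ≤ 1 := by
  induction cs with
  | nil => simp [altLoop]
  | cons c cs' ih =>
    simp only [altLoop]
    split_ifs with h
    · constructor
      · intro hfalse; cases hfalse
      · intro hall; exfalso; have := hall c List.mem_cons_self; omega
    · rw [ih]
      constructor
      · intro hall c' hc'
        rcases List.mem_cons.mp hc' with rfl | hm
        · omega
        · exact hall c' hm
      · intro hall c' hc'; exact hall c' (List.mem_cons_of_mem _ hc')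

-- single-valuedness over all distinct start chars ↔ pairwise single-valuedness of the zip
theorem pvAltLoop_iff_consistent (s e : List Char) :
    altLoop (PySem.Set.ofList s) (s.zip e) = true ↔
      ∀ p ∈ s.zip e, ∀ q ∈ s.zip e, p.1 = q.1 → p.2 = q.2 := by
  rw [pvAltLoop_eq_true_iff]
  constructor
  · intro h p hp q hq hpq
    have hc : p.1 ∈ s := (List.of_mem_zip hp).1
    exact (pvImages_le_one_iff (s.zip e) p.1).mp
      (h p.1 ((PySem.Set.mem_ofList s p.1).mpr hc)) p hp q hq rfl hpq.symm
  · intro h c _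
    exact (pvImages_le_one_iff (s.zip e) c).mpr
      (fun p hp q hq hpc hqc => h p hp q hq (hpc.trans hqc.symm))

-- ===== VERDICT (by name: the statement is the Claim_ definition above) =====
theorem canTransfer_spec : Claim_equal_canTransfer := by
  intro s e _
  unfold Spec_canTransfer canTransfer canTransfer_alt
  by_cases hlen : PySem.Str.len s ≠ PySem.Str.len e
  · rw [if_pos hlen, if_pos hlen]
  · rw [if_neg hlen, if_neg hlen]
    rw [not_not] at hlen
    have hl : s.toList.length = e.toList.length := by
      unfold PySem.Str.len at hlen; exact_mod_cast hlen
    have hupd : ∀ xs : List Char, PySem.Set.update PySem.Set.empty xs = PySem.Set.ofList xs :=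
      fun xs => rfl
    have hemp : pvConsistent (s.toList.zip e.toList) PySem.Dict.empty ↔
        (∀ p ∈ s.toList.zip e.toList, ∀ q ∈ s.toList.zip e.toList, p.1 = q.1 → p.2 = q.2) := by
      unfold pvConsistent
      simp [PySem.Dict.get?_empty]
    by_cases hs : ∀ p ∈ s.toList.zip e.toList, ∀ q ∈ s.toList.zip e.toList, p.1 = q.1 → p.2 = q.2
    · rw [if_pos ((pvAltLoop_iff_consistent _ _).mpr hs)]
      rw [Bool.eq_iff_iff, pvLoop_eq _ _ _ _ _ hl, hupd, hupd, hemp, Bool.not_eq_true']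
      exact and_iff_right hs
    · rw [if_neg (by rw [pvAltLoop_iff_consistent]; simpa using hs)]
      rw [Bool.eq_false_iff]
      intro h
      exact hs (hemp.mp ((pvLoop_eq _ _ _ _ _ hl).mp h).1)
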